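-- pv_equiv track=rewrite | github.com/AHTARazzak/rosalind_bioinf | stronghold/SIMS/SIMS.py | fitting_alignment
-- ===== SOURCE A (Python) =====
-- def fitting_alignment(v, w):
--     S = [[0 for j in range(len(w)+1)] for i in range(len(v)+1)]
--     backtrack = [[0 for j in range(len(w)+1)] for i in range(len(v)+1)]
--
--     for i in range(1, len(v)+1):
--         for j in range(1, len(w)+1):
--             scores = [S[i-1][j] - 1, S[i][j-1] - 1, S[i-1][j-1] + [-1, 1][v[i-1] == w[j-1]]]
--             S[i][j] = max(scores)
--             backtrack[i][j] = scores.index(S[i][j])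
--
--     j = len(w)
--     i = max(enumerate([S[row][j] for row in range(len(w), len(v))]),key=lambda x: x[1])[0] + len(w)
--     max_score = S[i][j]
--
--     v_aligned, w_aligned = v[:i], w[:j]
--
--     insert_indel = lambda word, i: word[:i] + '-' + word[i:]
--
--     while i*j != 0:
--         if backtrack[i][j] == 0:
--             i -= 1
--             w_aligned = insert_indel(w_aligned, j)
--         elif backtrack[i][j] == 1:
--             j -= 1
--             v_aligned = insert_indel(v_aligned, i)
--         elif backtrack[i][j] == 2:
--             i -= 1
--             j -= 1
--
--     v_aligned = v_aligned[i:]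
--
--     return str(max_score), v_aligned, w_aligned
-- ===== SOURCE B (Python) =====
-- def fitting_alignment(v, w):
--     # Same O(n*m) score fill, but no backtrack matrix: the traceback recomputes
--     # the direction from S, and the aligned strings are built back-to-front in
--     # lists and reversed at the end (no repeated string splicing).
--     n, m = len(v), len(w)
--     S = [[0] * (m + 1) for _ in range(n + 1)]
--     for i in range(1, n + 1):
--         for j in range(1, m + 1):
--             diag = S[i - 1][j - 1] + (1 if v[i - 1] == w[j - 1] else -1)
--             S[i][j] = max(S[i - 1][j] - 1, S[i][j - 1] - 1, diag)
--
--     best = m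
--     for row in range(m + 1, n):
--         if S[row][m] > S[best][m]:
--             best = row
--     i, j = best, m
--     max_score = S[i][j]
--
--     rv, rw = [], []
--     while i and j:
--         s = S[i][j]
--         if S[i - 1][j] - 1 == s:
--             i -= 1
--             rv.append(v[i]); rw.append('-')
--         elif S[i][j - 1] - 1 == s:
--             j -= 1
--             rv.append('-'); rw.append(w[j])
--         else:
--             i -= 1; j -= 1
--             rv.append(v[i]); rw.append(w[j])
--
--     v_aligned = ''.join(reversed(rv))
--     w_aligned = w[:j] + ''.join(reversed(rw))
--     return str(max_score), v_aligned, w_aligned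
-- ===== Notes on version B (the rewrite author's own statement) =====
-- stated objective: alternative
-- what changed: B drops A's backtrack matrix entirely (the traceback direction is recomputed from the score matrix S with the same up/left/diag first-max tie-break), replaces A's max(enumerate(...)) row selection with an explicit keep-first strict-max scan, and builds the aligned strings back-to-front in lists reversed once at the end instead of A's repeated insert_indel string splicing.
import Mathlib
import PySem

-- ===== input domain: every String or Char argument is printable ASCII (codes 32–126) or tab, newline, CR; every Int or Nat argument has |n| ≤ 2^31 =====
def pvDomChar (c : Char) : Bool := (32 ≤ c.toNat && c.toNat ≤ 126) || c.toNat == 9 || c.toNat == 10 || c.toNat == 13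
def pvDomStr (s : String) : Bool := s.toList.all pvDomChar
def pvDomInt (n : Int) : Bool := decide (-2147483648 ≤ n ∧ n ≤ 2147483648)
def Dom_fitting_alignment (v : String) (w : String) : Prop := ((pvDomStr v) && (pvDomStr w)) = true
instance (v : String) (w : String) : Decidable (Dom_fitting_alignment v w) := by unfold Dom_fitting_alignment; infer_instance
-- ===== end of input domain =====

-- B drops A's backtrack matrix (directions are recomputed from the score matrix during
-- traceback) and builds the aligned strings back-to-front in lists, reversing at the end,
-- instead of A's repeated string splicing; objective: alternative decomposition.

-- ===== PORT A =====
-- 2-D list read/write; every access made by either port is in range, where getD 0 is exact.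
def pvGet2 (S : List (List Int)) (i j : Nat) : Int := (S.getD i []).getD j 0
def pvSet2 (S : List (List Int)) (i j : Nat) (x : Int) : List (List Int) :=
  S.set i ((S.getD i []).set j x)

-- scores = [S[i-1][j] - 1, S[i][j-1] - 1, S[i-1][j-1] + [-1, 1][v[i-1] == w[j-1]]]
def pvScoresA (cv cw : List Char) (S : List (List Int)) (i j : Nat) : List Int :=
  [pvGet2 S (i-1) j - 1, pvGet2 S i (j-1) - 1,
   pvGet2 S (i-1) (j-1) + (if cv.getD (i-1) ' ' = cw.getD (j-1) ' ' then 1 else -1)]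

-- the two nested fill loops of A, carrying (S, backtrack)
def pvFillA (cv cw : List Char) : List (List Int) × List (List Int) :=
  (List.range' 1 cv.length).foldl (fun st i =>
    (List.range' 1 cw.length).foldl (fun st j =>
      let scores := pvScoresA cv cw st.1 i j
      let mx := (PySem.List.max? scores (fun x => x)).getD 0
      (pvSet2 st.1 i j mx,
       pvSet2 st.2 i j (((PySem.List.index? scores mx).getD 0 : Nat) : Int))) st)
    (List.replicate (cv.length+1) (List.replicate (cw.length+1) 0),
     List.replicate (cv.length+1) (List.replicate (cw.length+1) 0))

-- insert_indel = lambda word, i: word[:i] + '-' + word[i:]  (indices used are ≤ length; exact)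
def pvInsertIndel (word : List Char) (k : Nat) : List Char :=
  word.take k ++ '-' :: word.drop k

-- the while-loop of A, on fuel i+j (one unit per iteration: each branch lowers i+j by ≥ 1,
-- so the fuel never runs out from the top-level call); the final else is unreachable
-- (backtrack entries are always 0, 1 or 2; Python would loop forever there)
def pvBackA (BT : List (List Int)) : Nat → Nat → Nat → List Char → List Char →
    Nat × List Char × List Char
  | 0, i, _, va, wa => (i, va, wa)
  | fuel+1, i, j, va, wa =>
    if i = 0 ∨ j = 0 then (i, va, wa)
    else
      let b := pvGet2 BT i j
      if b = 0 then pvBackA BT fuel (i-1) j va (pvInsertIndel wa j)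
      else if b = 1 then pvBackA BT fuel i (j-1) (pvInsertIndel va i) wa
      else if b = 2 then pvBackA BT fuel (i-1) (j-1) va wa
      else (i, va, wa)

def fitting_alignment (v : String) (w : String) : String × String × String :=
  let cv := v.toList
  let cw := w.toList
  let n := cv.length
  let m := cw.length
  let SB := pvFillA cv cw
  -- i = max(enumerate([S[row][j] for row in range(len(w), len(v))]), key=x[1])[0] + len(w)
  -- (raises ValueError when n ≤ m: excluded by Pre_; the enumerate index is ≥ 0, toNat exact)
  let i0 := ((PySem.List.max? (PySem.List.enumerate
      ((List.range' m (n - m)).map (fun row => pvGet2 SB.1 row m)))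
      (fun x => x.2)).getD (0, 0)).1.toNat + m
  let maxScore := pvGet2 SB.1 i0 m
  -- v[:i], w[:j] with 0 ≤ i ≤ len are List.take
  let r := pvBackA SB.2 (i0 + m) i0 m (cv.take i0) (cw.take m)
  (PySem.Int.toStr maxScore, String.ofList (r.2.1.drop r.1), String.ofList r.2.2)

-- ===== PORT B =====
-- B's fill loop: same recurrence, no backtrack matrix
def pvFillB (cv cw : List Char) : List (List Int) :=
  (List.range' 1 cv.length).foldl (fun S i =>
    (List.range' 1 cw.length).foldl (fun S j =>
      let diag := pvGet2 S (i-1) (j-1) + (if cv.getD (i-1) ' ' = cw.getD (j-1) ' ' then 1 else -1)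
      pvSet2 S i j (max (max (pvGet2 S (i-1) j - 1) (pvGet2 S i (j-1) - 1)) diag)) S)
    (List.replicate (cv.length+1) (List.replicate (cw.length+1) 0))

-- B's traceback: recompute the direction from S, push the emitted chars onto rv/rw
-- (same while loop, same fuel discipline as pvBackA)
def pvBackB (S : List (List Int)) (cv cw : List Char) : Nat → Nat → Nat →
    List Char → List Char → Nat × Nat × List Char × List Char
  | 0, i, j, rv, rw => (i, j, rv, rw)
  | fuel+1, i, j, rv, rw =>
    if i = 0 ∨ j = 0 then (i, j, rv, rw)
    else
      let s := pvGet2 S i j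
      if pvGet2 S (i-1) j - 1 = s then
        pvBackB S cv cw fuel (i-1) j (rv ++ [cv.getD (i-1) ' ']) (rw ++ ['-'])
      else if pvGet2 S i (j-1) - 1 = s then
        pvBackB S cv cw fuel i (j-1) (rv ++ ['-']) (rw ++ [cw.getD (j-1) ' '])
      else
        pvBackB S cv cw fuel (i-1) (j-1) (rv ++ [cv.getD (i-1) ' ']) (rw ++ [cw.getD (j-1) ' '])

def fitting_alignment_alt (v : String) (w : String) : String × String × String :=
  let cv := v.toList
  let cw := w.toList
  let n := cv.length
  let m := cw.length
  let S := pvFillB cv cw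
  -- best = m; for row in range(m+1, n): if S[row][m] > S[best][m]: best = row
  let best := (List.range' (m+1) (n - (m+1))).foldl
      (fun best row => if pvGet2 S best m < pvGet2 S row m then row else best) m
  let maxScore := pvGet2 S best m
  let r := pvBackB S cv cw (best + m) best m [] []
  (PySem.Int.toStr maxScore,
   String.ofList r.2.2.1.reverse,
   String.ofList (cw.take r.2.1 ++ r.2.2.2.reverse))

-- ===== PRECONDITION & SPEC =====
-- A raises ValueError (max() of the empty row range range(len(w), len(v))) whenever
-- len(v) ≤ len(w); exactly those inputs are excluded.
def Pre_fitting_alignment (v : String) (w : String) : Prop :=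
  PySem.Str.len w < PySem.Str.len v
instance (v : String) (w : String) : Decidable (Pre_fitting_alignment v w) := by
  unfold Pre_fitting_alignment; infer_instance
def pvWitness_fitting_alignment : String × String := ("aba", "b")

def Spec_fitting_alignment (v : String) (w : String) (out : String × String × String) : Prop :=
  out = fitting_alignment_alt v w
instance (v : String) (w : String) (out : String × String × String) :
    Decidable (Spec_fitting_alignment v w out) := by unfold Spec_fitting_alignment; infer_instance

-- ===== CLAIM (what is proved, stated in full; the proofs are below) =====
def Claim_equal_fitting_alignment : Prop := ∀ (v : String) (w : String),
  Dom_fitting_alignment v w → Pre_fitting_alignment v w →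
  Spec_fitting_alignment v w (fitting_alignment v w)

-- ===== LEMMAS AND PROOFS =====

-- the optimal-score recurrence the fill loops tabulate
def pvSS (cv cw : List Char) : Nat → Nat → Int
  | 0, _ => 0
  | _+1, 0 => 0
  | i+1, j+1 =>
    max (max (pvSS cv cw i (j+1) - 1) (pvSS cv cw (i+1) j - 1))
      (pvSS cv cw i j + (if cv.getD i ' ' = cw.getD j ' ' then 1 else -1))
termination_by i j => (i, j)

lemma pvSS_zero_left (cv cw : List Char) (j : Nat) : pvSS cv cw 0 j = 0 := by simp [pvSS]

lemma pvSS_zero_right (cv cw : List Char) (i : Nat) : pvSS cv cw i 0 = 0 := by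
  cases i <;> simp [pvSS]

lemma pvSS_succ (cv cw : List Char) (i j : Nat) :
    pvSS cv cw (i+1) (j+1) =
      max (max (pvSS cv cw i (j+1) - 1) (pvSS cv cw (i+1) j - 1))
        (pvSS cv cw i j + (if cv.getD i ' ' = cw.getD j ' ' then 1 else -1)) := by
  simp [pvSS]

-- the direction A's backtrack matrix records, recomputed from scores (B's test chain)
def pvDir (cv cw : List Char) (i j : Nat) : Int :=
  if pvSS cv cw (i-1) j - 1 = pvSS cv cw i j then 0
  else if pvSS cv cw i (j-1) - 1 = pvSS cv cw i j then 1 else 2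

-- matrices as maps over index ranges
def pvMat (n m : Nat) (g : Nat → Nat → Int) : List (List Int) :=
  (List.range (n+1)).map fun a => (List.range (m+1)).map fun b => g a b

def pvEntS (cv cw : List Char) (k c : Nat) (a b : Nat) : Int :=
  if a < k ∨ (a = k ∧ b ≤ c) then pvSS cv cw a b else 0

def pvEntB (cv cw : List Char) (k c : Nat) (a b : Nat) : Int :=
  if 1 ≤ a ∧ 1 ≤ b ∧ (a < k ∨ (a = k ∧ b ≤ c)) then pvDir cv cw a b else 0

lemma pvMat_congr {n m : Nat} {g h : Nat → Nat → Int}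
    (H : ∀ a, a ≤ n → ∀ b, b ≤ m → g a b = h a b) : pvMat n m g = pvMat n m h := by
  unfold pvMat
  refine List.map_congr_left (fun a ha => ?_)
  refine List.map_congr_left (fun b hb => ?_)
  exact H a (by simpa using Nat.lt_succ_iff.mp (List.mem_range.mp ha))
    b (by simpa using Nat.lt_succ_iff.mp (List.mem_range.mp hb))

lemma pvGet2_mat {n m : Nat} (g : Nat → Nat → Int) {i j : Nat} (hi : i ≤ n) (hj : j ≤ m) :
    pvGet2 (pvMat n m g) i j = g i j := by
  unfold pvGet2 pvMat
  rw [PySem.List.getD_map_range _ _ _ _ (by omega), PySem.List.getD_map_range _ _ _ _ (by omega)]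

lemma set_map_range {α : Type} (f : Nat → α) (N i : Nat) (x : α) :
    ((List.range N).map f).set i x = (List.range N).map (fun r => if r = i then x else f r) := by
  apply List.ext_getElem
  · simp
  · intro k hk hk'
    simp only [List.getElem_set, List.getElem_map, List.getElem_range]
    split_ifs with h1 h2 <;> first | rfl | omega

lemma pvSet2_mat {n m : Nat} (g : Nat → Nat → Int) {i : Nat} (j : Nat) (x : Int) (hi : i ≤ n) :
    pvSet2 (pvMat n m g) i j x
      = pvMat n m (fun a b => if a = i ∧ b = j then x else g a b) := by
  unfold pvSet2 pvMat
  rw [PySem.List.getD_map_range _ _ _ _ (by omega), set_map_range, set_map_range]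
  refine List.map_congr_left (fun a _ => ?_)
  by_cases ha : a = i
  · subst ha
    rw [if_pos rfl]
    refine List.map_congr_left (fun b _ => ?_)
    by_cases hb : b = j <;> simp [hb]
  · simp only [if_neg ha]
    refine List.map_congr_left (fun b _ => ?_)
    simp [ha]

-- max([a,b,c]) and scores.index(max) in closed form
lemma pvMax3 (a b c : Int) : (PySem.List.max? [a,b,c] (fun x => x)).getD 0 = max (max a b) c := by
  simp only [PySem.List.max?, List.foldl_cons, List.foldl_nil]
  by_cases hab : a < b <;> simp only [hab, reduceIte] <;>
    split_ifs <;> simp only [Option.getD_some] <;> rw [max_def, max_def] <;> split_ifs <;> omega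

lemma pvIdx3 (a b c M : Int) (hM : M = max (max a b) c) :
    (((PySem.List.index? [a, b, c] M).getD 0 : Nat) : Int) =
      if a = M then 0 else if b = M then 1 else 2 := by
  by_cases ha : a = M
  · subst ha; rw [PySem.List.index?_cons_self]; simp
  · rw [PySem.List.index?_cons_of_ne _ ha]
    by_cases hb : b = M
    · subst hb; rw [PySem.List.index?_cons_self]; simp [ha]
    · rw [PySem.List.index?_cons_of_ne _ hb]
      have hc : c = M := by
        rcases max_choice (max a b) c with h | h <;> rcases max_choice a b with h2 | h2 <;> omega
      subst hc; rw [PySem.List.index?_cons_self]; simp [ha, hb]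

-- one cell of the fill loop of A
lemma pvStepA_cell (cv cw : List Char) (i c : Nat) (h1 : 1 ≤ i) (h2 : i ≤ cv.length)
    (hc : c + 1 ≤ cw.length) :
    (fun (st : List (List Int) × List (List Int)) j =>
      let scores := pvScoresA cv cw st.1 i j
      let mx := (PySem.List.max? scores (fun x => x)).getD 0
      (pvSet2 st.1 i j mx,
       pvSet2 st.2 i j (((PySem.List.index? scores mx).getD 0 : Nat) : Int)))
      (pvMat cv.length cw.length (pvEntS cv cw i c),
       pvMat cv.length cw.length (pvEntB cv cw i c)) (c+1)
    = (pvMat cv.length cw.length (pvEntS cv cw i (c+1)),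
       pvMat cv.length cw.length (pvEntB cv cw i (c+1))) := by
  obtain ⟨i', rfl⟩ : ∃ i', i = i' + 1 := ⟨i - 1, by omega⟩
  simp only [pvScoresA, Nat.add_sub_cancel]
  rw [pvGet2_mat _ (by omega) (by omega), pvGet2_mat _ (by omega) (by omega),
    pvGet2_mat _ (by omega) (by omega)]
  have hE1 : pvEntS cv cw (i'+1) c i' (c+1) = pvSS cv cw i' (c+1) := by
    unfold pvEntS; rw [if_pos (by omega)]
  have hE2 : pvEntS cv cw (i'+1) c (i'+1) c = pvSS cv cw (i'+1) c := by
    unfold pvEntS; rw [if_pos (by omega)]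
  have hE3 : pvEntS cv cw (i'+1) c i' c = pvSS cv cw i' c := by
    unfold pvEntS; rw [if_pos (by omega)]
  rw [hE1, hE2, hE3, pvMax3, ← pvSS_succ cv cw i' c,
    pvIdx3 _ _ _ _ (pvSS_succ cv cw i' c)]
  rw [pvSet2_mat _ _ _ (by omega), pvSet2_mat _ _ _ (by omega), Prod.mk.injEq]
  constructor
  · apply pvMat_congr
    intro a ha b hb
    by_cases h1 : a = i' + 1 ∧ b = c + 1
    · obtain ⟨rfl, rfl⟩ := h1
      rw [if_pos ⟨rfl, rfl⟩]
      unfold pvEntS; rw [if_pos (by omega)]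
    · rw [if_neg h1]
      unfold pvEntS
      by_cases h2 : a < i' + 1 ∨ (a = i' + 1 ∧ b ≤ c)
      · rw [if_pos h2, if_pos (by omega)]
      · rw [if_neg h2, if_neg (by omega)]
  · apply pvMat_congr
    intro a ha b hb
    by_cases h1 : a = i' + 1 ∧ b = c + 1
    · obtain ⟨rfl, rfl⟩ := h1
      rw [if_pos ⟨rfl, rfl⟩]
      unfold pvEntB pvDir
      rw [if_pos (show 1 ≤ i'+1 ∧ 1 ≤ c+1 ∧ (i'+1 < i'+1 ∨ (i'+1 = i'+1 ∧ c+1 ≤ c+1)) from by omega)]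
      simp only [Nat.add_sub_cancel]
    · rw [if_neg h1]
      unfold pvEntB
      by_cases h2 : 1 ≤ a ∧ 1 ≤ b ∧ (a < i' + 1 ∨ (a = i' + 1 ∧ b ≤ c))
      · rw [if_pos h2, if_pos (by omega)]
      · rw [if_neg h2, if_neg (by omega)]

-- the inner fill loop of A
lemma pvInnerA (cv cw : List Char) (i : Nat) (h1 : 1 ≤ i) (h2 : i ≤ cv.length) :
    ∀ c, c ≤ cw.length →
    (List.range' 1 c).foldl (fun st j =>
      let scores := pvScoresA cv cw st.1 i j
      let mx := (PySem.List.max? scores (fun x => x)).getD 0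
      (pvSet2 st.1 i j mx,
       pvSet2 st.2 i j (((PySem.List.index? scores mx).getD 0 : Nat) : Int)))
      (pvMat cv.length cw.length (pvEntS cv cw i 0),
       pvMat cv.length cw.length (pvEntB cv cw i 0))
    = (pvMat cv.length cw.length (pvEntS cv cw i c),
       pvMat cv.length cw.length (pvEntB cv cw i c)) := by
  intro c
  induction c with
  | zero => intro _; rfl
  | succ c ih =>
    intro hc
    have hcc := List.range'_concat (s := 1) (n := c) (step := 1)
    simp only [Nat.one_mul] at hcc
    rw [hcc, List.foldl_append, ih (by omega), List.foldl_cons, List.foldl_nil,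
      show 1 + c = c + 1 from by omega]
    exact pvStepA_cell cv cw i c h1 h2 hc

-- the outer fill loop of A
lemma pvOuterA (cv cw : List Char) : ∀ k, k ≤ cv.length →
    (List.range' 1 k).foldl (fun st i =>
      (List.range' 1 cw.length).foldl (fun st j =>
        let scores := pvScoresA cv cw st.1 i j
        let mx := (PySem.List.max? scores (fun x => x)).getD 0
        (pvSet2 st.1 i j mx,
         pvSet2 st.2 i j (((PySem.List.index? scores mx).getD 0 : Nat) : Int))) st)
      (pvMat cv.length cw.length (pvEntS cv cw 0 cw.length),
       pvMat cv.length cw.length (pvEntB cv cw 0 cw.length))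
    = (pvMat cv.length cw.length (pvEntS cv cw k cw.length),
       pvMat cv.length cw.length (pvEntB cv cw k cw.length)) := by
  intro k
  induction k with
  | zero => intro _; rfl
  | succ k ih =>
    intro hk
    have hcc := List.range'_concat (s := 1) (n := k) (step := 1)
    simp only [Nat.one_mul] at hcc
    rw [hcc, List.foldl_append, ih (by omega), List.foldl_cons, List.foldl_nil]
    have tS : pvMat cv.length cw.length (pvEntS cv cw k cw.length)
        = pvMat cv.length cw.length (pvEntS cv cw (k+1) 0) := by
      apply pvMat_congr; intro a ha b hb
      unfold pvEntS
      by_cases h2 : a < k ∨ (a = k ∧ b ≤ cw.length)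
      · rw [if_pos h2, if_pos (by omega)]
      · by_cases h3 : a < k+1 ∨ (a = k+1 ∧ b ≤ 0)
        · rw [if_neg h2, if_pos h3]
          have hb0 : b = 0 := by omega
          rw [hb0, pvSS_zero_right]
        · rw [if_neg h2, if_neg h3]
    have tB : pvMat cv.length cw.length (pvEntB cv cw k cw.length)
        = pvMat cv.length cw.length (pvEntB cv cw (k+1) 0) := by
      apply pvMat_congr; intro a ha b hb
      unfold pvEntB
      by_cases h2 : 1 ≤ a ∧ 1 ≤ b ∧ (a < k ∨ (a = k ∧ b ≤ cw.length))
      · rw [if_pos h2, if_pos (by omega)]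
      · rw [if_neg h2, if_neg (by omega)]
    rw [tS, tB, show 1 + k = k + 1 from by omega]
    exact pvInnerA cv cw (k+1) (by omega) (by omega) cw.length (le_refl _)

-- the whole fill of A produces the recurrence tables
lemma pvFillA_eq (cv cw : List Char) :
    pvFillA cv cw = (pvMat cv.length cw.length (pvEntS cv cw cv.length cw.length),
                     pvMat cv.length cw.length (pvEntB cv cw cv.length cw.length)) := by
  unfold pvFillA
  have initS : List.replicate (cv.length+1) (List.replicate (cw.length+1) (0:Int))
      = pvMat cv.length cw.length (pvEntS cv cw 0 cw.length) := by
    unfold pvMat pvEntS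
    apply List.ext_getElem
    · simp
    · intro a ha ha'
      simp only [List.getElem_replicate, List.getElem_map, List.getElem_range]
      apply List.ext_getElem
      · simp
      · intro b hb hb'
        simp only [List.getElem_replicate, List.getElem_map, List.getElem_range]
        split_ifs with h
        · have ha0 : a = 0 := by omega
          rw [ha0, pvSS_zero_left]
        · rfl
  have initB : List.replicate (cv.length+1) (List.replicate (cw.length+1) (0:Int))
      = pvMat cv.length cw.length (pvEntB cv cw 0 cw.length) := by
    unfold pvMat pvEntB
    apply List.ext_getElem
    · simp
    · intro a ha ha'
      simp only [List.getElem_replicate, List.getElem_map, List.getElem_range]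
      apply List.ext_getElem
      · simp
      · intro b hb hb'
        simp only [List.getElem_replicate, List.getElem_map, List.getElem_range]
        rw [if_neg (by omega)]
  have initPair : (List.replicate (cv.length+1) (List.replicate (cw.length+1) (0:Int)),
        List.replicate (cv.length+1) (List.replicate (cw.length+1) (0:Int)))
      = (pvMat cv.length cw.length (pvEntS cv cw 0 cw.length),
         pvMat cv.length cw.length (pvEntB cv cw 0 cw.length)) := by
    rw [Prod.mk.injEq]; exact ⟨initS, initB⟩
  rw [initPair]
  exact pvOuterA cv cw cv.length (le_refl _)

-- the S component of A's fold evolves independently of backtrack, and is B's fold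
lemma pvFoldl_fst {α σ τ : Type} (l : List α) (F : σ × τ → α → σ × τ) (f : σ → α → σ)
    (h : ∀ p a, (F p a).1 = f p.1 a) : ∀ (st : σ) (t : τ), (l.foldl F (st, t)).1 = l.foldl f st := by
  induction l with
  | nil => intro st t; rfl
  | cons x u ih =>
    intro st t
    simp only [List.foldl_cons]
    have h2 := ih (F (st, t) x).1 (F (st, t) x).2
    simp only [Prod.mk.eta] at h2
    rw [h2, h]

lemma pvFillB_eq (cv cw : List Char) :
    pvFillB cv cw = pvMat cv.length cw.length (pvEntS cv cw cv.length cw.length) := by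
  have hfst : pvFillB cv cw = (pvFillA cv cw).1 := by
    unfold pvFillA pvFillB
    refine (pvFoldl_fst _ _ _ ?_ _ _).symm
    intro p a
    obtain ⟨p1, p2⟩ := p
    refine pvFoldl_fst _ _ _ ?_ p1 p2
    intro q b
    simp only [pvScoresA]
    rw [pvMax3]
  rw [hfst, pvFillA_eq]

-- final-table access
lemma pvS_entry (cv cw : List Char) {i j : Nat} (hi : i ≤ cv.length) (hj : j ≤ cw.length) :
    pvGet2 (pvMat cv.length cw.length (pvEntS cv cw cv.length cw.length)) i j
      = pvSS cv cw i j := by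
  rw [pvGet2_mat _ hi hj]; unfold pvEntS; rw [if_pos]; omega

lemma pvB_entry (cv cw : List Char) {i j : Nat} (h1 : 1 ≤ i) (hi : i ≤ cv.length)
    (h2 : 1 ≤ j) (hj : j ≤ cw.length) :
    pvGet2 (pvMat cv.length cw.length (pvEntB cv cw cv.length cw.length)) i j
      = pvDir cv cw i j := by
  rw [pvGet2_mat _ hi hj]; unfold pvEntB; rw [if_pos]; exact ⟨h1, h2, by omega⟩

-- A's first-max over enumerate equals B's keep-first strict-max scan
lemma pvArgmax (g : Nat → Int) (m : Nat) : ∀ L, 1 ≤ L →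
    ∃ b : Nat, m ≤ b ∧ b < m + L ∧
      (List.range' (m+1) (L-1)).foldl (fun best row => if g best < g row then row else best) m = b ∧
      PySem.List.max? (PySem.List.enumerate ((List.range' m L).map g)) (fun x => x.2)
        = some (((b - m : Nat) : Int), g b) := by
  intro L hL
  induction L, hL using Nat.le_induction with
  | base =>
    refine ⟨m, le_refl m, by omega, rfl, ?_⟩
    simp [List.range'_one, PySem.List.enumerate_cons, PySem.List.enumerate_nil,
      PySem.List.max?, List.foldl]
  | succ L hL ih =>
    obtain ⟨b, hb1, hb2, hfold, hmax⟩ := ih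
    simp only [PySem.List.max?] at hmax ⊢
    have hlen : ((List.range' m L).map g).length = L := by simp
    have hcA : List.range' m (L+1) = List.range' m L ++ [m + L] := by
      have := List.range'_concat (s := m) (n := L) (step := 1); simpa using this
    have hcB : List.range' (m+1) ((L+1)-1) = List.range' (m+1) (L-1) ++ [m + L] := by
      obtain ⟨L', rfl⟩ : ∃ L', L = L' + 1 := ⟨L - 1, by omega⟩
      show List.range' (m+1) (L'+1) = List.range' (m+1) L' ++ [m + (L'+1)]
      have hh := List.range'_concat (s := m+1) (n := L') (step := 1)
      simp only [Nat.one_mul] at hh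
      rw [hh, show m+1+L' = m + (L'+1) from by omega]
    by_cases hlt : g b < g (m + L)
    · refine ⟨m + L, by omega, by omega, ?_, ?_⟩
      · rw [hcB, List.foldl_append, hfold]; simp [hlt]
      · rw [hcA, List.map_append, PySem.List.enumerate_append, List.foldl_append, hmax]
        simp [PySem.List.enumerate_cons, PySem.List.enumerate_nil, hlt, hlen]
    · refine ⟨b, hb1, by omega, ?_, ?_⟩
      · rw [hcB, List.foldl_append, hfold]; simp [hlt]
      · rw [hcA, List.map_append, PySem.List.enumerate_append, List.foldl_append, hmax]
        simp [PySem.List.enumerate_cons, PySem.List.enumerate_nil, hlt, hlen]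

-- B's traceback only shifts its accumulators
lemma pvBackB_acc (S : List (List Int)) (cv cw : List Char) : ∀ f i j rv rw,
    pvBackB S cv cw f i j rv rw =
      ((pvBackB S cv cw f i j [] []).1, (pvBackB S cv cw f i j [] []).2.1,
       rv ++ (pvBackB S cv cw f i j [] []).2.2.1, rw ++ (pvBackB S cv cw f i j [] []).2.2.2) := by
  intro f
  induction f with
  | zero => intro i j rv rw; simp [pvBackB]
  | succ f ih =>
    intro i j rv rw
    by_cases h : i = 0 ∨ j = 0
    · simp [pvBackB, h]
    · by_cases c1 : pvGet2 S (i-1) j - 1 = pvGet2 S i j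
      · simp only [pvBackB, h, c1, if_false, reduceIte]
        rw [ih (i-1) j (rv ++ [cv.getD (i-1) ' ']) (rw ++ ['-']),
            ih (i-1) j ([] ++ [cv.getD (i-1) ' ']) ([] ++ ['-'])]
        simp [List.append_assoc]
      · by_cases c2 : pvGet2 S i (j-1) - 1 = pvGet2 S i j
        · simp only [pvBackB, h, c1, c2, if_false, reduceIte]
          rw [ih i (j-1) (rv ++ ['-']) (rw ++ [cw.getD (j-1) ' ']),
              ih i (j-1) ([] ++ ['-']) ([] ++ [cw.getD (j-1) ' '])]
          simp [List.append_assoc]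
        · simp only [pvBackB, h, c1, c2, if_false]
          rw [ih (i-1) (j-1) (rv ++ [cv.getD (i-1) ' ']) (rw ++ [cw.getD (j-1) ' ']),
              ih (i-1) (j-1) ([] ++ [cv.getD (i-1) ' ']) ([] ++ [cw.getD (j-1) ' '])]
          simp [List.append_assoc]

lemma pvBackB_le (S : List (List Int)) (cv cw : List Char) : ∀ f i j rv rw,
    (pvBackB S cv cw f i j rv rw).1 ≤ i ∧ (pvBackB S cv cw f i j rv rw).2.1 ≤ j := by
  intro f
  induction f with
  | zero => intro i j rv rw; simp [pvBackB]
  | succ f ih =>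
    intro i j rv rw
    by_cases h : i = 0 ∨ j = 0
    · simp [pvBackB, h]
    · simp only [pvBackB, h, if_false]
      split_ifs with c1 c2
      · have := ih (i-1) j (rv ++ [cv.getD (i-1) ' ']) (rw ++ ['-']); omega
      · have := ih i (j-1) (rv ++ ['-']) (rw ++ [cw.getD (j-1) ' ']); omega
      · have := ih (i-1) (j-1) (rv ++ [cv.getD (i-1) ' ']) (rw ++ [cw.getD (j-1) ' ']); omega

lemma take_getD {α : Type} (l : List α) (k : Nat) (h : k < l.length) (d : α) :
    l.take (k+1) = l.take k ++ [l.getD k d] := by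
  rw [List.take_add_one, List.getElem?_eq_getElem h]
  simp [List.getD, List.getElem?_eq_getElem h]

-- the two tracebacks walk the same path and build the same strings
lemma pvBack_main (cv cw : List Char) (S BT : List (List Int))
    (hS : ∀ i j, i ≤ cv.length → j ≤ cw.length → pvGet2 S i j = pvSS cv cw i j)
    (hBT : ∀ i j, 1 ≤ i → i ≤ cv.length → 1 ≤ j → j ≤ cw.length →
      pvGet2 BT i j = pvDir cv cw i j) :
    ∀ f i j, i ≤ cv.length → j ≤ cw.length → ∀ Tv Tw,
    pvBackA BT f i j (cv.take i ++ Tv) (cw.take j ++ Tw) =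
      ((pvBackB S cv cw f i j [] []).1,
       cv.take (pvBackB S cv cw f i j [] []).1 ++
         (pvBackB S cv cw f i j [] []).2.2.1.reverse ++ Tv,
       cw.take (pvBackB S cv cw f i j [] []).2.1 ++
         (pvBackB S cv cw f i j [] []).2.2.2.reverse ++ Tw) := by
  intro f
  induction f with
  | zero => intro i j hi hj Tv Tw; simp [pvBackA, pvBackB]
  | succ f ih =>
    intro i j hi hj Tv Tw
    by_cases h : i = 0 ∨ j = 0
    · simp [pvBackA, pvBackB, h]
    · have hi1 : 1 ≤ i := by omega
      have hj1 : 1 ≤ j := by omega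
      have hBT' : pvGet2 BT i j = pvDir cv cw i j := hBT i j hi1 hi hj1 hj
      have hA : pvGet2 S (i-1) j = pvSS cv cw (i-1) j := hS _ _ (by omega) hj
      have hB2 : pvGet2 S i (j-1) = pvSS cv cw i (j-1) := hS _ _ hi (by omega)
      have hM : pvGet2 S i j = pvSS cv cw i j := hS _ _ hi hj
      have tv : cv.take i ++ Tv = cv.take (i-1) ++ (cv.getD (i-1) ' ' :: Tv) := by
        have h3 := take_getD cv (i-1) (by omega) ' '
        rw [show (i-1)+1 = i from by omega] at h3
        rw [h3, List.append_assoc]; rfl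
      have tw : cw.take j ++ Tw = cw.take (j-1) ++ (cw.getD (j-1) ' ' :: Tw) := by
        have h3 := take_getD cw (j-1) (by omega) ' '
        rw [show (j-1)+1 = j from by omega] at h3
        rw [h3, List.append_assoc]; rfl
      have hwlen : (cw.take j).length = j := by simp; omega
      have hvlen : (cv.take i).length = i := by simp; omega
      have iiw : pvInsertIndel (cw.take j ++ Tw) j = cw.take j ++ ('-' :: Tw) := by
        unfold pvInsertIndel
        rw [List.take_left' hwlen, List.drop_left' hwlen]
      have iiv : pvInsertIndel (cv.take i ++ Tv) i = cv.take i ++ ('-' :: Tv) := by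
        unfold pvInsertIndel
        rw [List.take_left' hvlen, List.drop_left' hvlen]
      unfold pvDir at hBT'
      by_cases c1 : pvSS cv cw (i-1) j - 1 = pvSS cv cw i j
      · have hb0 : pvGet2 BT i j = 0 := by rw [hBT', if_pos c1]
        have lhs : pvBackA BT (f+1) i j (cv.take i ++ Tv) (cw.take j ++ Tw)
            = pvBackA BT f (i-1) j (cv.take i ++ Tv) (pvInsertIndel (cw.take j ++ Tw) j) := by
          simp [pvBackA, h, hb0]
        rw [lhs, iiw, tv, ih (i-1) j (by omega) hj (cv.getD (i-1) ' ' :: Tv) ('-' :: Tw)]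
        have cc1 : pvGet2 S (i-1) j - 1 = pvGet2 S i j := by rw [hA, hM]; exact c1
        have rhs : pvBackB S cv cw (f+1) i j [] []
            = pvBackB S cv cw f (i-1) j ([] ++ [cv.getD (i-1) ' ']) ([] ++ ['-']) := by
          simp [pvBackB, h, cc1]
        rw [rhs, pvBackB_acc S cv cw f (i-1) j ([] ++ [cv.getD (i-1) ' ']) ([] ++ ['-'])]
        simp [List.append_assoc]
      · by_cases c2 : pvSS cv cw i (j-1) - 1 = pvSS cv cw i j
        · have hb1 : pvGet2 BT i j = 1 := by rw [hBT', if_neg c1, if_pos c2]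
          have lhs : pvBackA BT (f+1) i j (cv.take i ++ Tv) (cw.take j ++ Tw)
              = pvBackA BT f i (j-1) (pvInsertIndel (cv.take i ++ Tv) i) (cw.take j ++ Tw) := by
            simp [pvBackA, h, hb1]
          rw [lhs, iiv, tw, ih i (j-1) hi (by omega) ('-' :: Tv) (cw.getD (j-1) ' ' :: Tw)]
          have cc1 : ¬(pvGet2 S (i-1) j - 1 = pvGet2 S i j) := by rw [hA, hM]; exact c1
          have cc2 : pvGet2 S i (j-1) - 1 = pvGet2 S i j := by rw [hB2, hM]; exact c2
          have rhs : pvBackB S cv cw (f+1) i j [] []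
              = pvBackB S cv cw f i (j-1) ([] ++ ['-']) ([] ++ [cw.getD (j-1) ' ']) := by
            simp [pvBackB, h, cc1, cc2]
          rw [rhs, pvBackB_acc S cv cw f i (j-1) ([] ++ ['-']) ([] ++ [cw.getD (j-1) ' '])]
          simp [List.append_assoc]
        · have hb2 : pvGet2 BT i j = 2 := by rw [hBT', if_neg c1, if_neg c2]
          have lhs : pvBackA BT (f+1) i j (cv.take i ++ Tv) (cw.take j ++ Tw)
              = pvBackA BT f (i-1) (j-1) (cv.take i ++ Tv) (cw.take j ++ Tw) := by
            simp [pvBackA, h, hb2]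
          rw [lhs, tv, tw, ih (i-1) (j-1) (by omega) (by omega)
            (cv.getD (i-1) ' ' :: Tv) (cw.getD (j-1) ' ' :: Tw)]
          have cc1 : ¬(pvGet2 S (i-1) j - 1 = pvGet2 S i j) := by rw [hA, hM]; exact c1
          have cc2 : ¬(pvGet2 S i (j-1) - 1 = pvGet2 S i j) := by rw [hB2, hM]; exact c2
          have rhs : pvBackB S cv cw (f+1) i j [] []
              = pvBackB S cv cw f (i-1) (j-1) ([] ++ [cv.getD (i-1) ' ']) ([] ++ [cw.getD (j-1) ' ']) := by
            simp [pvBackB, h, cc1, cc2]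
          rw [rhs, pvBackB_acc S cv cw f (i-1) (j-1) ([] ++ [cv.getD (i-1) ' ']) ([] ++ [cw.getD (j-1) ' '])]
          simp [List.append_assoc]

-- ===== VERDICT (by name: the statement is the Claim_ definition above) =====
theorem fitting_alignment_spec : Claim_equal_fitting_alignment := by
  intro v w _ hpre
  unfold Spec_fitting_alignment
  unfold Pre_fitting_alignment at hpre
  rw [PySem.Str.len_eq, PySem.Str.len_eq] at hpre
  simp only [fitting_alignment, fitting_alignment_alt]
  set cv := v.toList with hcv
  set cw := w.toList with hcw
  have hmn : cw.length < cv.length := by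
    simp at hpre
    omega
  rw [pvFillA_eq, pvFillB_eq]
  simp only
  obtain ⟨b, hbm, hbn, hfold, hmax⟩ :=
    pvArgmax (fun row => pvGet2 (pvMat cv.length cw.length
      (pvEntS cv cw cv.length cw.length)) row cw.length) cw.length (cv.length - cw.length)
      (by omega)
  have hbn' : b < cv.length := by omega
  rw [hmax]
  rw [show cv.length - (cw.length + 1) = (cv.length - cw.length) - 1 from by omega, hfold]
  simp only [Option.getD_some, Int.toNat_natCast]
  rw [show b - cw.length + cw.length = b from by omega]
  have hback := pvBack_main cv cw
    (pvMat cv.length cw.length (pvEntS cv cw cv.length cw.length))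
    (pvMat cv.length cw.length (pvEntB cv cw cv.length cw.length))
    (fun i j hi hj => pvS_entry cv cw hi hj)
    (fun i j h1 h2 h3 h4 => pvB_entry cv cw h1 h2 h3 h4)
    (b + cw.length) b cw.length (le_of_lt hbn') (le_refl cw.length) [] []
  simp only [List.append_nil] at hback
  rw [hback]
  have hB1le := (pvBackB_le (pvMat cv.length cw.length (pvEntS cv cw cv.length cw.length))
    cv cw (b + cw.length) b cw.length [] []).1
  have hlen1 : (cv.take ((pvBackB (pvMat cv.length cw.length
      (pvEntS cv cw cv.length cw.length)) cv cw (b + cw.length) b cw.length [] []).1)).length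
      = (pvBackB (pvMat cv.length cw.length (pvEntS cv cw cv.length cw.length))
          cv cw (b + cw.length) b cw.length [] []).1 := by
    simp
    omega
  rw [List.drop_left' hlen1]
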